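-- pv_equiv track=rewrite | github.com/ManikantaReddy-rgb/HV-DSATask | Question2.py | print_duplicates
-- ===== SOURCE A (Python) =====
-- def print_duplicates(arr):
--   result = []
--   for i in range(len(arr)):
--     for j in range(i + 1, len(arr)):
--       if arr[i] == arr[j]:
--         result.append(arr[i])
--         break
--   return result
-- ===== SOURCE B (Python) =====
-- def print_duplicates(arr):
--   last = {}
--   for i, x in enumerate(arr):
--     last[x] = i
--   return [x for i, x in enumerate(arr) if last[x] != i]
-- ===== Notes on version B (the rewrite author's own statement) =====
-- stated objective: faster
-- what changed: Replaces A's nested forward scan (for each index, scan the rest for an equal element) with two linear passes: a dict of each value's last index, then a single filtered pass keeping occurrences whose index is not the last.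
import Mathlib
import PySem

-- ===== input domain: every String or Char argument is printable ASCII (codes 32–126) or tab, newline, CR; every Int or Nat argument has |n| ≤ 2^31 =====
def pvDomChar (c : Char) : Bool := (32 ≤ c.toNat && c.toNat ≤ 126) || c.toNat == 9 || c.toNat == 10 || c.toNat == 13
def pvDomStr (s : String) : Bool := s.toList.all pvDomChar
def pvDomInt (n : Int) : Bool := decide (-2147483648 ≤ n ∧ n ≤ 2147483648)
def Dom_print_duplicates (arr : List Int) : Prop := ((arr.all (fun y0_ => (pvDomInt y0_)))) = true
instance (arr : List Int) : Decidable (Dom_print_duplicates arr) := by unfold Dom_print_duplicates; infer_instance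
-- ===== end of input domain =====

-- B builds a last-occurrence index table in one pass and filters in a second pass,
-- replacing A's quadratic nested forward scan (objective: faster, O(n) vs O(n^2)).

-- ===== PORT A =====
-- inner loop 'for j in range(i+1, len(arr)): if arr[i] == arr[j]: append; break'
-- (the break means: append once iff some j matches; indices scanned are always in range)
def pdInner (arr : List Int) (x : Int) : List Nat → Bool
  | [] => false
  | j :: js => if arr.getD j 0 == x then true else pdInner arr x js

def print_duplicates (arr : List Int) : List Int :=
  (List.range arr.length).foldl
    (fun res i =>
      if pdInner arr (arr.getD i 0) (List.range' (i + 1) (arr.length - (i + 1))) then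
        res ++ [arr.getD i 0]
      else res) []

-- ===== PORT B =====
-- first pass: last[x] = i for i, x in enumerate(arr)  (later inserts overwrite)
-- second pass: keep x when last[x] != i; last[x] always hits (the default -1 is unused)
def print_duplicates_alt (arr : List Int) : List Int :=
  let last : PySem.Dict Int Int :=
    (PySem.List.enumerate arr 0).foldl (fun d p => d.insert p.2 p.1) PySem.Dict.empty
  (PySem.List.enumerate arr 0).foldl
    (fun res p => if last.getD p.2 (-1) != p.1 then res ++ [p.2] else res) []

-- ===== PRECONDITION & SPEC =====
def Spec_print_duplicates (arr : List Int) (out : List Int) : Prop := out = print_duplicates_alt arr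
instance (arr : List Int) (out : List Int) : Decidable (Spec_print_duplicates arr out) := by unfold Spec_print_duplicates; infer_instance

-- ===== CLAIM (what is proved, stated in full; the proofs are below) =====
def Claim_equal_print_duplicates : Prop := ∀ (arr : List Int), Dom_print_duplicates arr → Spec_print_duplicates arr (print_duplicates arr)

-- ===== LEMMAS AND PROOFS =====

-- the value getD returns from B's first-pass dict: last match wins, else the default
def lastD : List Int → Int → Int → Int → Int
  | [], _, _, dft => dft
  | y :: ys, s, x, dft => lastD ys (s + 1) x (if x = y then s else dft)

theorem pdInner_eq_any (arr : List Int) (x : Int) (js : List Nat) :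
    pdInner arr x js = js.any (fun j => arr.getD j 0 == x) := by
  induction js with
  | nil => rfl
  | cons j js ih => simp [pdInner, ih]; by_cases h : arr.getD j 0 == x <;> simp_all

theorem map_getD_range' (m : Nat) : ∀ (s : Nat) (xs : List Int), s + m = xs.length →
    (List.range' s m).map (fun j => xs.getD j 0) = xs.drop s := by
  induction m with
  | zero => intro s xs h; simp [List.drop_of_length_le, ← h]
  | succ m ih =>
    intro s xs h
    have hs : s < xs.length := by omega
    rw [List.range'_succ]
    simp only [List.map_cons]
    rw [ih (s + 1) xs (by omega), List.getD_eq_getElem _ _ hs,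
      List.drop_eq_getElem_cons hs]

theorem dict_fold_getD (xs : List Int) : ∀ (s : Int) (d0 : PySem.Dict Int Int) (x dft : Int),
    ((PySem.List.enumerate xs s).foldl (fun d p => d.insert p.2 p.1) d0).getD x dft
      = lastD xs s x (d0.getD x dft) := by
  induction xs with
  | nil => intro s d0 x dft; simp [PySem.List.enumerate_nil, lastD]
  | cons y ys ih =>
    intro s d0 x dft
    rw [PySem.List.enumerate_cons]
    simp only [List.foldl_cons, lastD]
    rw [ih (s + 1)]
    congr 1
    rw [PySem.Dict.getD_insert]

theorem lastD_append (as : List Int) : ∀ (bs : List Int) (s x dft : Int),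
    lastD (as ++ bs) s x dft = lastD bs (s + (as.length : Int)) x (lastD as s x dft) := by
  induction as with
  | nil => intro bs s x dft; simp [lastD]
  | cons a as ih =>
    intro bs s x dft
    simp only [List.cons_append, lastD, ih, List.length_cons]
    congr 1
    push_cast
    ring

theorem lastD_of_not_mem (xs : List Int) : ∀ (s x dft : Int), x ∉ xs → lastD xs s x dft = dft := by
  induction xs with
  | nil => intro s x dft _; rfl
  | cons y ys ih =>
    intro s x dft h
    simp only [List.mem_cons, not_or] at h
    simp [lastD, h.1, ih _ _ _ h.2]

theorem lastD_ge_of_mem (xs : List Int) : ∀ (s x dft : Int), x ∈ xs → s ≤ lastD xs s x dft := by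
  induction xs with
  | nil => intro s x dft h; simp at h
  | cons y ys ih =>
    intro s x dft h
    simp only [lastD]
    rcases List.mem_cons.mp h with h | h
    · by_cases hm : x ∈ ys
      · have := ih (s + 1) x (if x = y then s else dft) hm; omega
      · rw [lastD_of_not_mem _ _ _ _ hm, if_pos h]
    · have := ih (s + 1) x (if x = y then s else dft) h; omega

theorem lastD_key (arr : List Int) (k : Nat) (hk : k < arr.length) :
    lastD arr 0 (arr[k]) (-1) = (k : Int) ↔ arr[k] ∉ arr.drop (k + 1) := by
  have hsplit : arr = (arr.take k ++ [arr[k]]) ++ arr.drop (k + 1) := by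
    conv_lhs => rw [← List.take_append_drop (k + 1) arr]
    congr 1
    rw [List.take_add_one, List.getElem?_eq_getElem hk]
    rfl
  have hlen : (((arr.take k ++ [arr[k]]).length : Nat) : Int) = (k : Int) + 1 := by
    simp [List.length_take]
    omega
  have hinner : lastD (arr.take k ++ [arr[k]]) 0 (arr[k]) (-1) = (k : Int) := by
    rw [lastD_append]
    simp [lastD, List.length_take, Nat.min_eq_left (le_of_lt hk)]
  obtain ⟨x, hx⟩ : ∃ x, arr[k] = x := ⟨_, rfl⟩
  rw [hx] at hinner hlen ⊢
  rw [hx] at hsplit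
  have hval : lastD arr 0 x (-1)
      = lastD (arr.drop (k + 1)) ((k : Int) + 1) x (k : Int) := by
    conv_lhs => rw [hsplit]
    rw [lastD_append, hinner, hlen]
    ring_nf
  rw [hval]
  constructor
  · intro h hm
    have := lastD_ge_of_mem (arr.drop (k + 1)) ((k : Int) + 1) x (k : Int) hm
    omega
  · intro hm
    rw [lastD_of_not_mem _ _ _ _ hm]

theorem enumerate_eq_map_range (arr : List Int) :
    PySem.List.enumerate arr 0
      = (List.range arr.length).map (fun k : Nat => (((k : Nat) : Int), arr.getD k 0)) := by
  rw [PySem.List.enumerate_eq_map_pyRange (d := 0), PySem.List.pyRange_one]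
  simp [List.map_map, Function.comp_def]

theorem print_duplicates_eq_canon (arr : List Int) :
    print_duplicates arr =
      ((List.range arr.length).filter
          (fun k => decide (arr.getD k 0 ∈ arr.drop (k + 1)))).map (fun k => arr.getD k 0) := by
  unfold print_duplicates
  rw [PySem.List.foldl_append_if]
  simp only [List.nil_append]
  congr 1
  apply List.filter_congr
  intro k hk
  have hk' : k < arr.length := List.mem_range.mp hk
  rw [pdInner_eq_any]
  have hmap := map_getD_range' (arr.length - (k + 1)) (k + 1) arr (by omega)
  have : (List.range' (k + 1) (arr.length - (k + 1))).any (fun j => arr.getD j 0 == arr.getD k 0)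
      = (arr.drop (k + 1)).any (fun y => y == arr.getD k 0) := by
    rw [← hmap, List.any_map]; rfl
  rw [this, Bool.eq_iff_iff]
  simp only [List.any_eq_true, beq_iff_eq, decide_eq_true_eq]
  constructor
  · rintro ⟨y, hy, rfl⟩; exact hy
  · intro h; exact ⟨_, h, rfl⟩

theorem map_filter_congr {α β : Type} (l : List α) (p q : α → Bool) (f g : α → β)
    (hp : ∀ x ∈ l, p x = q x) (hf : ∀ x ∈ l, f x = g x) :
    (l.filter p).map f = (l.filter q).map g := by
  rw [List.filter_congr hp]
  exact List.map_congr_left (fun x hx => hf x (List.mem_of_mem_filter hx))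

theorem print_duplicates_alt_eq_canon (arr : List Int) :
    print_duplicates_alt arr =
      ((List.range arr.length).filter
          (fun k => decide (arr.getD k 0 ∈ arr.drop (k + 1)))).map (fun k => arr.getD k 0) := by
  unfold print_duplicates_alt
  rw [PySem.List.foldl_append_if
    (p := fun p : Int × Int =>
      ((PySem.List.enumerate arr 0).foldl (fun d q => d.insert q.2 q.1)
          PySem.Dict.empty).getD p.2 (-1) != p.1)
    (f := fun p : Int × Int => p.2)]
  simp only [List.nil_append, dict_fold_getD, PySem.Dict.getD_empty]
  conv_lhs => rw [enumerate_eq_map_range arr]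
  rw [List.filter_map, List.map_map]
  simp only [Function.comp_def]
  apply map_filter_congr
  · intro k hk
    have hk' : k < arr.length := List.mem_range.mp hk
    rw [List.getD_eq_getElem _ _ hk', Bool.eq_iff_iff]
    simp only [bne_iff_ne, ne_eq, decide_eq_true_eq]
    rw [lastD_key arr k hk']
    tauto
  · intro k _
    rfl

-- ===== VERDICT (by name: the statement is the Claim_ definition above) =====
theorem print_duplicates_spec : Claim_equal_print_duplicates := by
  intro arr _
  unfold Spec_print_duplicates
  rw [print_duplicates_eq_canon, print_duplicates_alt_eq_canon]
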